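-- pv_equiv track=rewrite | github.com/strathclyde-artificial-intelligence/egobots-and-sidekicks | egobotsidekickv2function.py | addegowelderdrop
-- ===== SOURCE A (Python) =====
-- def addegowelderdrop(file, welders, locations, times):
--     sep1 = file.partition(';welderstart')
--     newfile = sep1[0]+sep1[1]+'\n'
--     sep2 = sep1[2].partition(';welderend')
--     sep3 = sep2[0].splitlines()
--     for line in sep3:
--         linecheck = 0
--         for i, welder in enumerate(welders):
--             if welder in line:
--                 newfile = newfile + '(at ' + times[i] + ' (dropped ' + welder + ' ' + locations[i] + '))\n'
--                 linecheck = 1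
--         if linecheck == 0:
--             newfile = newfile + line + '\n'
--     newfile = newfile + sep2[1] + sep2[2]
--     return newfile
-- ===== SOURCE B (Python) =====
-- def addegowelderdrop(file, welders, locations, times):
--     head, mark, rest = file.partition(';welderstart')
--     body, endmark, tail = rest.partition(';welderend')
--     lines = body.splitlines()
--     ann = [[] for _ in lines]
--     for i, w in enumerate(welders):
--         ann = [a + ['(at ' + times[i] + ' (dropped ' + w + ' ' + locations[i] + '))\n'] if w in line else a
--                for line, a in zip(lines, ann)]
--     mid = ''.join(''.join(a) if a else line + '\n' for line, a in zip(lines, ann))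
--     return head + mark + '\n' + mid + endmark + tail
-- ===== Notes on version B (the rewrite author's own statement) =====
-- stated objective: alternative
-- what changed: A scans each section line against all welders keeping an accumulator string and a match flag; B interchanges the loops, making one pass per welder that builds per-line annotation lists, and joins them (annotation list empty <=> keep the line) at the end.
import Mathlib
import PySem

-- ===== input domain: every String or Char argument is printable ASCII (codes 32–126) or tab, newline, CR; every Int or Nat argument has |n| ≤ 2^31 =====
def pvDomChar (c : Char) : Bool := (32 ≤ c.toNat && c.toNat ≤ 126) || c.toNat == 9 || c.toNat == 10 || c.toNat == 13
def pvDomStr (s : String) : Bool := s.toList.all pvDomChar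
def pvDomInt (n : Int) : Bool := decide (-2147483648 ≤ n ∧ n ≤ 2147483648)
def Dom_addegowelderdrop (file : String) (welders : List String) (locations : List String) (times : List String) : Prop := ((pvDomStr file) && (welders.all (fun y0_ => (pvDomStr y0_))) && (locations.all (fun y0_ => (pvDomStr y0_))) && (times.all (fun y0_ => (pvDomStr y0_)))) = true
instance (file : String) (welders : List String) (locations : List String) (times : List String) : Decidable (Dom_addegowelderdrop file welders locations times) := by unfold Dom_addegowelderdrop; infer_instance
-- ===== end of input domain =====

-- B replaces A's line-by-line scan with an accumulator string and a match flag by a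
-- welder-by-welder pass building per-line annotation lists, joined at the end (objective:
-- alternative decomposition; same asymptotic cost).

-- s.partition(sep) for a nonempty literal sep (exact: CPython takes the FIRST occurrence;
-- shared library helper, used by both ports the way both Pythons call str.partition)
def pyPartition (s sep : List Char) : List Char × List Char × List Char :=
  let i := PySem.Chars.find s sep
  if i = -1 then (s, [], [])
  else (s.take i.toNat, sep, s.drop (i.toNat + sep.length))

-- the annotation string '(at T (dropped W L))\n' for enumerate entry p = (i, welder);
-- times[i] / locations[i] are in range under Pre_; pyGetD keeps the port total outside it
def pvAnnot (times locations : List String) (p : Int × String) : List Char :=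
  "(at ".toList ++ (PySem.List.pyGetD times p.1 "").toList ++ " (dropped ".toList ++
    p.2.toList ++ [' '] ++ (PySem.List.pyGetD locations p.1 "").toList ++ "))\n".toList

-- ===== PORT A =====
def addegowelderdrop (file : String) (welders : List String) (locations : List String) (times : List String) : String :=
  let sep1 := pyPartition file.toList ";welderstart".toList
  let newfile0 := sep1.1 ++ sep1.2.1 ++ ['\n']
  let sep2 := pyPartition sep1.2.2 ";welderend".toList
  let sep3 := PySem.Chars.splitlines sep2.1
  let newfile1 := sep3.foldl (fun nf line =>
      let st := (PySem.List.enumerate welders 0).foldl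
        (fun (st : List Char × Int) p =>
          if PySem.Chars.isIn p.2.toList line then
            (st.1 ++ pvAnnot times locations p, 1)
          else st) (nf, 0)
      if st.2 = 0 then st.1 ++ line ++ ['\n'] else st.1) newfile0
  String.ofList (newfile1 ++ sep2.2.1 ++ sep2.2.2)

-- ===== PORT B =====
def addegowelderdrop_alt (file : String) (welders : List String) (locations : List String) (times : List String) : String :=
  let part1 := pyPartition file.toList ";welderstart".toList
  let part2 := pyPartition part1.2.2 ";welderend".toList
  let lines := PySem.Chars.splitlines part2.1
  let ann0 : List (List (List Char)) := lines.map (fun _ => [])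
  let ann := (PySem.List.enumerate welders 0).foldl
    (fun ann p =>
      (lines.zip ann).map (fun la =>
        if PySem.Chars.isIn p.2.toList la.1 then la.2 ++ [pvAnnot times locations p] else la.2)) ann0
  let mid := ((lines.zip ann).map (fun la => if la.2 = [] then la.1 ++ ['\n'] else la.2.flatten)).flatten
  String.ofList (part1.1 ++ part1.2.1 ++ ['\n'] ++ mid ++ part2.2.1 ++ part2.2.2)

-- ===== PRECONDITION & SPEC =====
-- Pre_ excludes exactly the inputs where Python A raises IndexError: a welder whose index is
-- beyond the end of 'times' or 'locations' occurs as a substring of some line of the section.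
def Pre_addegowelderdrop (file : String) (welders : List String) (locations : List String) (times : List String) : Prop :=
  ∀ line ∈ PySem.Chars.splitlines (pyPartition (pyPartition file.toList ";welderstart".toList).2.2 ";welderend".toList).1,
    ∀ p ∈ PySem.List.enumerate welders 0,
      PySem.Chars.isIn p.2.toList line = true → p.1 < (times.length : Int) ∧ p.1 < (locations.length : Int)
instance (file : String) (welders : List String) (locations : List String) (times : List String) : Decidable (Pre_addegowelderdrop file welders locations times) := by unfold Pre_addegowelderdrop; infer_instance
def pvWitness_addegowelderdrop : String × List String × List String × List String :=
  ("hdr;welderstartx1\nzz;welderendtail", ["x", "q"], ["bay2", "bay3"], ["12", "13"])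

def Spec_addegowelderdrop (file : String) (welders : List String) (locations : List String) (times : List String) (out : String) : Prop := out = addegowelderdrop_alt file welders locations times
instance (file : String) (welders : List String) (locations : List String) (times : List String) (out : String) : Decidable (Spec_addegowelderdrop file welders locations times out) := by unfold Spec_addegowelderdrop; infer_instance

-- ===== CLAIM (what is proved, stated in full; the proofs are below) =====
def Claim_equal_addegowelderdrop : Prop := ∀ (file : String) (welders : List String) (locations : List String) (times : List String), Dom_addegowelderdrop file welders locations times → Pre_addegowelderdrop file welders locations times → Spec_addegowelderdrop file welders locations times (addegowelderdrop file welders locations times)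

-- ===== LEMMAS AND PROOFS =====

-- the per-line annotation list both programs produce, in welder order
def pvAnnots (times locations : List String) (l : List (Int × String)) (line : List Char) : List (List Char) :=
  (l.filter (fun p => PySem.Chars.isIn p.2.toList line)).map (pvAnnot times locations)

theorem pvAnnots_nil (times locations : List String) (line : List Char) :
    pvAnnots times locations [] line = [] := rfl

theorem pvAnnots_cons (times locations : List String) (p : Int × String) (l : List (Int × String)) (line : List Char) :
    pvAnnots times locations (p :: l) line =
      if PySem.Chars.isIn p.2.toList line then
        pvAnnot times locations p :: pvAnnots times locations l line
      else pvAnnots times locations l line := by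
  simp only [pvAnnots, List.filter_cons]
  split <;> simp_all


-- A's inner loop over the welders, characterised (c generalises the running flag)
theorem innerA (times locations : List String) (line : List Char)
    (l : List (Int × String)) (nf : List Char) (c : Int) :
    l.foldl (fun (st : List Char × Int) p =>
        if PySem.Chars.isIn p.2.toList line then
          (st.1 ++ pvAnnot times locations p, 1) else st) (nf, c) =
      (nf ++ (pvAnnots times locations l line).flatten,
       if pvAnnots times locations l line = [] then c else 1) := by
  induction l generalizing nf c with
  | nil => simp [pvAnnots_nil]
  | cons p l ih =>
    rw [List.foldl_cons, pvAnnots_cons]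
    by_cases h : PySem.Chars.isIn p.2.toList line = true
    · simp only [h, if_true, ih, List.flatten_cons, List.append_assoc]
      simp
    · simp only [Bool.not_eq_true] at h
      simp only [h, Bool.false_eq_true, if_false, ih]

-- zipWith composed with a second zipWith over the same left list
theorem zipWith_zipWith_left {α β γ δ : Type} (f : α → γ → δ) (g : α → β → γ)
    (l : List α) (m : List β) :
    List.zipWith f l (List.zipWith g l m) = List.zipWith (fun x b => f x (g x b)) l m := by
  induction l generalizing m with
  | nil => simp
  | cons x l ih => cases m with
    | nil => simp
    | cons b m => simp [ih]

theorem zipWith_snd {α β : Type} (l : List α) (m : List β) (h : m.length = l.length) :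
    List.zipWith (fun _ b => b) l m = m := by
  induction l generalizing m with
  | nil => simp_all
  | cons x l ih => cases m with
    | nil => simp
    | cons b m => simp_all

theorem zip_eq_zipWith {α β γ : Type} (f : α → β → γ) (l : List α) (m : List β) :
    (l.zip m).map (fun p => f p.1 p.2) = List.zipWith f l m := by
  induction l generalizing m with
  | nil => simp
  | cons x l ih => cases m with
    | nil => simp
    | cons b m => simp [ih]

-- B's per-welder rebuilding of the annotation table, characterised
theorem foldB (times locations : List String) (lines : List (List Char))
    (l : List (Int × String)) (start : List (List (List Char)))
    (h : start.length = lines.length) :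
    l.foldl (fun ann p =>
        (lines.zip ann).map (fun la =>
          if PySem.Chars.isIn p.2.toList la.1 then la.2 ++ [pvAnnot times locations p] else la.2)) start =
      List.zipWith (fun line a => a ++ pvAnnots times locations l line) lines start := by
  induction l generalizing start with
  | nil =>
    simp only [List.foldl_nil, pvAnnots_nil, List.append_nil]
    exact (zipWith_snd lines start h).symm
  | cons p l ih =>
    rw [List.foldl_cons,
      zip_eq_zipWith (fun line a => if PySem.Chars.isIn p.2.toList line then a ++ [pvAnnot times locations p] else a) lines start,
      ih _ (by rw [List.length_zipWith]; omega),
      zipWith_zipWith_left]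
    congr 1
    funext line a
    rw [pvAnnots_cons]
    by_cases hc : PySem.Chars.isIn p.2.toList line = true <;> simp [hc]

-- A's outer loop over the lines, characterised
theorem outerA (times locations : List String) (welders : List String)
    (lines : List (List Char)) (init : List Char) :
    lines.foldl (fun nf line =>
      let st := (PySem.List.enumerate welders 0).foldl
        (fun (st : List Char × Int) p =>
          if PySem.Chars.isIn p.2.toList line then
            (st.1 ++ pvAnnot times locations p, 1)
          else st) (nf, 0)
      if st.2 = 0 then st.1 ++ line ++ ['\n'] else st.1) init =
    init ++ (lines.map (fun line =>
      if pvAnnots times locations (PySem.List.enumerate welders 0) line = [] then line ++ ['\n']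
      else (pvAnnots times locations (PySem.List.enumerate welders 0) line).flatten)).flatten := by
  induction lines generalizing init with
  | nil => simp
  | cons line lines ih =>
    rw [List.foldl_cons, ih]
    simp only [innerA]
    by_cases h : pvAnnots times locations (PySem.List.enumerate welders 0) line = []
    · simp [h, List.append_assoc]
    · simp [h, List.append_assoc]

theorem zipWith_map_nil {α β γ : Type} (f : α → List β → γ) (l : List α) :
    List.zipWith f l (l.map (fun _ => ([] : List β))) = l.map (fun x => f x []) := by
  induction l with
  | nil => rfl
  | cons x l ih => simp_all

theorem map_zip_map_self {α β γ : Type} (f : α → β) (g : α × β → γ) (l : List α) :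
    (l.zip (l.map f)).map g = l.map (fun x => g (x, f x)) := by
  induction l with
  | nil => rfl
  | cons x l ih => simp_all

-- ===== VERDICT (by name: the statement is the Claim_ definition above) =====
theorem addegowelderdrop_spec : Claim_equal_addegowelderdrop := by
  intro file welders locations times _ _
  show addegowelderdrop file welders locations times = addegowelderdrop_alt file welders locations times
  simp only [addegowelderdrop, addegowelderdrop_alt]
  rw [outerA, foldB _ _ _ _ _ (by simp), zipWith_map_nil, map_zip_map_self]
  simp [List.append_assoc]
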